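-- pv_equiv track=rewrite | github.com/cole/advent-of-code | 2024/day09.py | compress_fragmented
-- ===== SOURCE A (Python) =====
-- FREE = -1
--
-- def compress_fragmented(expanded):
--     while True:
--         try:
--             first_free = expanded.index(FREE)
--         except ValueError:
--             break
--
--         last_value = expanded.pop()
--         if last_value != FREE:
--             expanded[first_free] = last_value
--
--     return expanded
-- ===== SOURCE B (Python) =====
-- FREE = -1
--
-- def compress_fragmented(expanded):
--     # One pass: keep the first n slots (n = number of file blocks), filling each
--     # FREE slot with the next non-FREE value taken from the right end.
--     # Note: unlike A, this does not mutate its argument; equivalence is about the return value.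
--     n = sum(1 for v in expanded if v != FREE)
--     src = iter([v for v in reversed(expanded[n:]) if v != FREE])
--     return [v if v != FREE else next(src) for v in expanded[:n]]
-- ===== Notes on version B (the rewrite author's own statement) =====
-- stated objective: alternative
-- what changed: Replaces the repeated expanded.index(FREE)-scan-and-pop loop with a single left-to-right pass: count the file blocks n, then fill each FREE slot in the first n positions with the next non-FREE value taken from the right end.
import Mathlib
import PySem

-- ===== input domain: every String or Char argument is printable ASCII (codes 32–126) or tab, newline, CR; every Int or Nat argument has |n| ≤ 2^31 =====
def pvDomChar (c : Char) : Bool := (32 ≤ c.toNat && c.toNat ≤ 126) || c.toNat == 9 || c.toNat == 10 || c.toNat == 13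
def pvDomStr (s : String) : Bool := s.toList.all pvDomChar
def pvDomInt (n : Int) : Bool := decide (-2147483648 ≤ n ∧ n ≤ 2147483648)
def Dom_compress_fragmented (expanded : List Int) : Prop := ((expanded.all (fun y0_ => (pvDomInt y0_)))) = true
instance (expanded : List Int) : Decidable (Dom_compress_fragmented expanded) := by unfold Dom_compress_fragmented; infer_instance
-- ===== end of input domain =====

-- B replaces A's repeated index/pop loop by a single left-to-right pass that fills each
-- free slot with the next value taken from the right end (alternative algorithm, similar cost).
-- A mutates its argument in place; B does not: the equivalence proved here is about the return value.

-- ===== PORT A =====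
-- The while loop pops one element per iteration, so expanded.length iterations always
-- suffice; the fuel argument only makes that same computation total.
def pvCompAGo : Nat → List Int → List Int
  | 0, l => l
  | fuel+1, l =>
      match PySem.List.index? l (-1) with
      | none => l                                   -- ValueError → break
      | some first_free =>
        match PySem.List.pop? l with
        | none => l                                 -- unreachable: l contains -1, hence nonempty
        | some (last_value, rest) =>
          if last_value ≠ -1 then pvCompAGo fuel (rest.set first_free last_value)
          else pvCompAGo fuel rest

def compress_fragmented (expanded : List Int) : List Int :=
  pvCompAGo expanded.length expanded

-- ===== PORT B =====
-- '[v if v != FREE else next(src) for v in expanded[:n]]', consuming the iterator src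
-- (headD's default is unreachable: the prefix has exactly as many frees as src has values)
def pvFillB : List Int → List Int → List Int
  | [], _ => []
  | v :: t, src => if v ≠ -1 then v :: pvFillB t src else src.headD 0 :: pvFillB t src.tail

-- the body of B after computing n; kept as a helper so the proofs can reason about n directly
def pvAltN (expanded : List Int) (n : Nat) : List Int :=
  pvFillB (expanded.take n) (((expanded.drop n).reverse).filter (fun v => v != -1))

def compress_fragmented_alt (expanded : List Int) : List Int :=
  pvAltN expanded (expanded.filter (fun v => v != -1)).length

-- ===== PRECONDITION & SPEC =====
def Spec_compress_fragmented (expanded : List Int) (out : List Int) : Prop := out = compress_fragmented_alt expanded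
instance (expanded : List Int) (out : List Int) : Decidable (Spec_compress_fragmented expanded out) := by unfold Spec_compress_fragmented; infer_instance

-- ===== CLAIM (what is proved, stated in full; the proofs are below) =====
def Claim_equal_compress_fragmented : Prop := ∀ (expanded : List Int), Dom_compress_fragmented expanded → Spec_compress_fragmented expanded (compress_fragmented expanded)

-- ===== LEMMAS AND PROOFS =====

-- a list without frees passes through the fill unchanged
theorem pvFill_no_free (p : List Int) (src : List Int) (h : (-1 : Int) ∉ p) :
    pvFillB p src = p := by
  induction p generalizing src with
  | nil => rfl
  | cons x t ih =>
    have hx : x ≠ -1 := fun hx => h (hx ▸ List.mem_cons_self)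
    simp [pvFillB, hx, ih _ (fun hm => h (List.mem_cons_of_mem _ hm))]

-- writing v into the first free slot = keeping the slot and prepending v to the source
theorem pvFill_move (pre t src : List Int) (v : Int) (hpre : (-1 : Int) ∉ pre) (hv : v ≠ -1) :
    pvFillB (pre ++ v :: t) src = pvFillB (pre ++ -1 :: t) (v :: src) := by
  induction pre generalizing src with
  | nil => simp [pvFillB, hv]
  | cons x p ih =>
    have hx : x ≠ -1 := fun hx => hpre (hx ▸ List.mem_cons_self)
    simp only [List.cons_append, pvFillB, ne_eq, hx, not_false_eq_true, if_true]
    rw [ih _ (fun hm => hpre (List.mem_cons_of_mem _ hm))]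

theorem pvSet_append_len (pre b : List Int) (x v : Int) :
    (pre ++ x :: b).set pre.length v = pre ++ v :: b := by
  induction pre with
  | nil => rfl
  | cons y p ih => simp [ih]

theorem pvFilter_self (pre : List Int) (hpre : (-1 : Int) ∉ pre) :
    pre.filter (fun v => v != -1) = pre := by
  refine List.filter_eq_self.mpr (fun v hv => ?_)
  simp only [bne_iff_ne, ne_eq]
  exact fun h => hpre (h ▸ hv)

theorem pvAlt_no_free (l : List Int) (h : (-1 : Int) ∉ l) :
    compress_fragmented_alt l = l := by
  unfold compress_fragmented_alt pvAltN
  rw [pvFilter_self l h]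
  simp [pvFill_no_free l _ h]

-- dropping a trailing free block does not change the compacted result
theorem pvAlt_drop_free (rest : List Int) :
    compress_fragmented_alt (rest ++ [-1]) = compress_fragmented_alt rest := by
  unfold compress_fragmented_alt
  have hn : ((rest ++ [-1]).filter (fun v => v != -1)).length
      = (rest.filter (fun v => v != -1)).length := by simp
  rw [hn]
  unfold pvAltN
  have hle : (rest.filter (fun v => v != -1)).length ≤ rest.length := List.length_filter_le _ _
  rw [List.take_append_of_le_length hle, List.drop_append]
  have h0 : (rest.filter (fun v => v != -1)).length - rest.length = 0 := by omega
  simp [h0]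

-- moving the trailing value into the first free slot does not change the compacted result
theorem pvAlt_move (pre b : List Int) (last : Int) (hpre : (-1 : Int) ∉ pre) (hl : last ≠ -1) :
    compress_fragmented_alt (pre ++ last :: b) = compress_fragmented_alt (pre ++ -1 :: (b ++ [last])) := by
  unfold compress_fragmented_alt
  have hfp := pvFilter_self pre hpre
  have hfl : (last != -1) = true := by simpa using hl
  set fb := (b.filter (fun v => v != -1)).length with hfb
  have hfble : fb ≤ b.length := List.length_filter_le _ _
  have hn1 : ((pre ++ last :: b).filter (fun v => v != -1)).length = pre.length + (fb + 1) := by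
    simp [List.filter_append, hfp, hfl, ← hfb]
  have hn2 : ((pre ++ -1 :: (b ++ [last])).filter (fun v => v != -1)).length = pre.length + (fb + 1) := by
    simp [List.filter_append, hfp, hfl, ← hfb]
  rw [hn1, hn2]
  unfold pvAltN
  -- takes
  have ht1 : (pre ++ last :: b).take (pre.length + (fb + 1)) = pre ++ last :: b.take fb := by
    rw [List.take_append]
    simp
  have ht2 : (pre ++ -1 :: (b ++ [last])).take (pre.length + (fb + 1))
      = pre ++ -1 :: b.take fb := by
    rw [List.take_append]
    simp [List.take_append_of_le_length hfble]
  -- drops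
  have hd1 : (pre ++ last :: b).drop (pre.length + (fb + 1)) = b.drop fb := by
    rw [List.drop_append]
    simp
  have hd2 : (pre ++ -1 :: (b ++ [last])).drop (pre.length + (fb + 1)) = b.drop fb ++ [last] := by
    rw [List.drop_append]
    simp [List.drop_append_of_le_length hfble]
  rw [ht1, ht2, hd1, hd2]
  have hsrc : ((b.drop fb ++ [last]).reverse.filter (fun v => v != -1))
      = last :: ((b.drop fb).reverse.filter (fun v => v != -1)) := by
    simp [List.filter_cons, hfl]
  rw [hsrc]
  exact pvFill_move pre (b.take fb) _ last hpre hl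

theorem pvCompAGo_eq (fuel : Nat) :
    ∀ l : List Int, l.length ≤ fuel → pvCompAGo fuel l = compress_fragmented_alt l := by
  induction fuel with
  | zero =>
    intro l hl
    have : l = [] := List.eq_nil_of_length_eq_zero (Nat.le_zero.mp hl)
    subst this; rfl
  | succ fuel ih =>
    intro l hl
    cases hidx : PySem.List.index? l (-1) with
    | none =>
      have hmem : (-1 : Int) ∉ l := (PySem.List.index?_eq_none_iff l (-1)).mp hidx
      rw [pvCompAGo]
      simp only [hidx]
      exact (pvAlt_no_free l hmem).symm
    | some i =>
      have hmem : (-1 : Int) ∈ l := by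
        have := (PySem.List.index?_isSome_iff l (-1)).mp (by rw [hidx]; rfl)
        exact this
      have hne : l ≠ [] := by rintro rfl; simp at hmem
      obtain ⟨rest, last, rfl⟩ := List.eq_nil_or_concat l |>.resolve_left hne
      simp only [List.concat_eq_append] at hidx hl hmem ⊢
      have hpop : PySem.List.pop? (rest ++ [last]) = some (last, rest) :=
        PySem.List.pop?_last rest last
      have hrl : rest.length ≤ fuel := by
        have := hl; simp at this; omega
      rw [pvCompAGo]
      simp only [hidx, hpop]
      by_cases hlv : last = -1
      · subst hlv
        simp only [ne_eq, not_true_eq_false, if_false]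
        rw [ih rest hrl]
        exact (pvAlt_drop_free rest).symm
      · simp only [ne_eq, hlv, not_false_eq_true, if_true]
        -- locate the first free slot: it lies inside rest
        obtain ⟨pre, suf, heq, hlen, hnot⟩ := (PySem.List.index?_eq_some_iff _ _ _).mp hidx
        have hsufne : suf ≠ [] := by
          rintro rfl
          have : rest ++ [last] = pre ++ [-1] := by simpa using heq
          have := (List.concat_inj.mp (by simpa [List.concat_eq_append] using this)).2
          exact hlv this
        obtain ⟨b, last', rfl⟩ := List.eq_nil_or_concat suf |>.resolve_left hsufne
        have heq' : rest ++ [last] = (pre ++ -1 :: b) ++ [last'] := by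
          simpa using heq
        obtain ⟨hrest, hlast⟩ := List.append_inj' heq' rfl
        obtain rfl : last = last' := by simpa using hlast
        rw [hrest, ← hlen, pvSet_append_len]
        rw [ih _ (by simp [hrest] at hrl ⊢; omega)]
        rw [pvAlt_move pre b last hnot hlv]
        congr 1
        simp

-- ===== VERDICT (by name: the statement is the Claim_ definition above) =====
theorem compress_fragmented_spec : Claim_equal_compress_fragmented := by
  intro expanded _
  unfold Spec_compress_fragmented compress_fragmented
  exact pvCompAGo_eq expanded.length expanded (le_refl _)
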